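-- pv_equiv track=rewrite | github.com/wazuh/wazuh | tools/policy-migration/refactor_regex.py | _has_unescaped_brackets_in_rn_tokens
-- ===== SOURCE A (Python) =====
-- from typing import List, Tuple, Set, Optional
--
-- def _has_unescaped_brackets(payload: str, quote_char: Optional[str]) -> bool:
--     """Return True if payload contains an unescaped '[' or ']' based on quote style.
--     - Double-quoted: needs escaping unless at least two consecutive backslashes (even count >= 2)
--     - Single/unquoted: needs escaping if preceding backslashes count is even
--     """
--     n = len(payload)
--     i = 0
--     while i < n:
--         ch = payload[i]
--         if ch in ('[', ']'):
--             # Count preceding backslashes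
--             cnt = 0
--             k = i - 1
--             while k >= 0 and payload[k] == '\\':
--                 cnt += 1
--                 k -= 1
--             if quote_char == '"':
--                 if not (cnt >= 2 and (cnt % 2 == 0)):
--                     return True
--             else:
--                 if cnt % 2 == 0:
--                     return True
--         i += 1
--     return False
--
-- def _has_unescaped_brackets_in_rn_tokens(text: str, quote_char: Optional[str]) -> bool:
--     """Return True if any r:/n:/!r:/!n: token payload contains unescaped '[' or ']' (quote-aware)."""
--     i = 0
--     s = text
--     n = len(s)
--
--     def read_until_boundary(k: int) -> Tuple[str, int]:
--         j = k
--         while j < n and not (s.startswith(' && ', j) or s.startswith(' compare ', j)):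
--             j += 1
--         return s[k:j], j
--
--     while i < n:
--         if i + 2 < n and s[i] == '!' and s[i + 1] in ('r', 'n') and s[i + 2] == ':':
--             i += 3
--             payload, i = read_until_boundary(i)
--             if _has_unescaped_brackets(payload, quote_char):
--                 return True
--             continue
--         if i + 1 < n and s[i] in ('r', 'n') and s[i + 1] == ':':
--             i += 2
--             payload, i = read_until_boundary(i)
--             if _has_unescaped_brackets(payload, quote_char):
--                 return True
--             continue
--         i += 1
--     return False
-- ===== SOURCE B (Python) =====
-- from typing import Optional
--
-- def _has_unescaped_brackets_in_rn_tokens(text: str, quote_char: Optional[str]) -> bool: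
--     """Single forward pass per payload: track the running consecutive-backslash
--     count instead of back-scanning before each bracket; boundaries located with
--     str.find instead of a char-by-char startswith loop."""
--     double = (quote_char == '"')
--
--     def payload_bad(p: str) -> bool:
--         run = 0
--         for ch in p:
--             if ch == '\\':
--                 run += 1
--             elif ch in '[]':
--                 if double:
--                     if not (run >= 2 and run % 2 == 0):
--                         return True
--                 elif run % 2 == 0:
--                     return True
--                 run = 0
--             else:
--                 run = 0
--         return False
--
--     i, n = 0, len(text)
--     while i < n:
--         if text[i] in 'rn' and text.startswith(':', i + 1):
--             j = i + 2
--             cands = [e for e in (text.find(' && ', j), text.find(' compare ', j)) if e != -1]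
--             end = min(cands) if cands else n
--             if payload_bad(text[j:end]):
--                 return True
--             i = end
--         else:
--             i += 1
--     return False
-- ===== Notes on version B (the rewrite author's own statement) =====
-- stated objective: faster
-- what changed: Payload check is one forward pass maintaining the running consecutive-backslash count (instead of a backward scan before every bracket), payload boundaries are located with str.find instead of a per-position startswith loop, and the redundant '!r:'/'!n:' special case is dropped.
import Mathlib
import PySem

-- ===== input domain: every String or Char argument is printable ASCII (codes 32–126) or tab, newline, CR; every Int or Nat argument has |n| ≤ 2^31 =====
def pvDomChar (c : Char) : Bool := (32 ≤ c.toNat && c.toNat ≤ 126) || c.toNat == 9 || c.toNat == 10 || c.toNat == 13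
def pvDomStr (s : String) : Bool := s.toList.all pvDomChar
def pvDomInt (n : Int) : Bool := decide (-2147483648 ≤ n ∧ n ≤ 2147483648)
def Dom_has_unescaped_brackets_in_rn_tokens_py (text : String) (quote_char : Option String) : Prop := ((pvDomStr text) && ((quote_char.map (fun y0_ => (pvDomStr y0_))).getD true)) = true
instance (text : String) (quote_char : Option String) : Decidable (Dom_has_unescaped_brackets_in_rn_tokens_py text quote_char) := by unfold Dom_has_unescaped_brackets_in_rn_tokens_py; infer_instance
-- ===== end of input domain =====

-- B replaces A's per-bracket backward backslash scan with one forward pass carrying the running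
-- consecutive-backslash count, locates payload boundaries by substring search instead of a
-- per-position startswith loop, and drops A's redundant '!r:'/'!n:' branch (objective: faster).


-- ===== PORT A =====
-- Back-scan count of backslashes immediately before the current position
-- (the `while k >= 0 and payload[k] == '\\'` loop, over the reversed processed prefix).
def pvCountBack : List Char → Nat
  | [] => 0
  | c :: cs => if c = '\\' then pvCountBack cs + 1 else 0

def pvBadA (quote_char : Option String) (cnt : Nat) : Bool :=
  if quote_char = some "\"" then !(decide (cnt ≥ 2 ∧ cnt % 2 = 0)) else decide (cnt % 2 = 0)

-- `_has_unescaped_brackets`: index loop ported as recursion carrying the reversed prefix.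
def pvHasUnA (quote_char : Option String) : List Char → List Char → Bool
  | _, [] => false
  | prev, c :: cs =>
    if c = '[' ∨ c = ']' then
      if pvBadA quote_char (pvCountBack prev) then true else pvHasUnA quote_char (c :: prev) cs
    else pvHasUnA quote_char (c :: prev) cs

def pvBoundaryAt (l : List Char) : Bool :=
  List.isPrefixOf [' ', '&', '&', ' '] l || List.isPrefixOf [' ', 'c', 'o', 'm', 'p', 'a', 'r', 'e', ' '] l

-- `read_until_boundary`: advance char by char until a boundary starts here.
def pvRuB : List Char → List Char × List Char
  | [] => ([], [])
  | c :: cs =>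
    if pvBoundaryAt (c :: cs) then ([], c :: cs)
    else
      let pr := pvRuB cs
      (c :: pr.1, pr.2)

theorem pvRuB_len : ∀ l : List Char, (pvRuB l).2.length ≤ l.length := by
  intro l
  induction l with
  | nil => simp [pvRuB]
  | cons c cs ih =>
    simp only [pvRuB]
    split
    · simp
    · simpa using Nat.le_succ_of_le ih

-- outer while loop of `_has_unescaped_brackets_in_rn_tokens`
def pvOuterA (quote_char : Option String) : List Char → Bool
  | [] => false
  | [_] => false
  | [c0, c1] =>
    if (c0 = 'r' ∨ c0 = 'n') ∧ c1 = ':' then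
      let pr := pvRuB ([] : List Char)
      if pvHasUnA quote_char [] pr.1 then true else pvOuterA quote_char pr.2
    else pvOuterA quote_char [c1]
  | c0 :: c1 :: c2 :: rest2 =>
    if c0 = '!' ∧ (c1 = 'r' ∨ c1 = 'n') ∧ c2 = ':' then
      let pr := pvRuB rest2
      if pvHasUnA quote_char [] pr.1 then true else pvOuterA quote_char pr.2
    else if (c0 = 'r' ∨ c0 = 'n') ∧ c1 = ':' then
      let pr := pvRuB (c2 :: rest2)
      if pvHasUnA quote_char [] pr.1 then true else pvOuterA quote_char pr.2
    else pvOuterA quote_char (c1 :: c2 :: rest2)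
  termination_by l => l.length
  decreasing_by
  · simp [pvRuB]
  · simp
  · have h := pvRuB_len rest2; simp at h ⊢; omega
  · have h := pvRuB_len (c2 :: rest2); simp at h ⊢; omega
  · simp

def has_unescaped_brackets_in_rn_tokens_py (text : String) (quote_char : Option String) : Bool :=
  pvOuterA quote_char text.toList

-- ===== PORT B =====
-- one forward pass: `run` is the current count of consecutive backslashes
def pvRunCheck (double : Bool) : Nat → List Char → Bool
  | _, [] => false
  | run, c :: cs =>
    if c = '\\' then pvRunCheck double (run + 1) cs
    else if c = '[' ∨ c = ']' then
      if (if double then !(decide (run ≥ 2 ∧ run % 2 = 0)) else decide (run % 2 = 0)) then true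
      else pvRunCheck double 0 cs
    else pvRunCheck double 0 cs

-- text.find(pat, j): index of first occurrence, none if absent
def pvFindSub (pat : List Char) : List Char → Option Nat
  | [] => if List.isPrefixOf pat ([] : List Char) then some 0 else none
  | c :: cs => if List.isPrefixOf pat (c :: cs) then some 0 else (pvFindSub pat cs).map (· + 1)

-- min of the found boundary positions (or the end), then slice
def pvSplitB (l : List Char) : List Char × List Char :=
  let e1 := pvFindSub [' ', '&', '&', ' '] l
  let e2 := pvFindSub [' ', 'c', 'o', 'm', 'p', 'a', 'r', 'e', ' '] l
  let e : Nat :=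
    match e1, e2 with
    | some a, some b => min a b
    | some a, none => a
    | none, some b => b
    | none, none => l.length
  (l.take e, l.drop e)

theorem pvSplitB_len : ∀ l : List Char, (pvSplitB l).2.length ≤ l.length := by
  intro l; simp only [pvSplitB]; simp

def pvOuterB (double : Bool) : List Char → Bool
  | [] => false
  | [_] => false
  | c0 :: c1 :: rest =>
    if (c0 = 'r' ∨ c0 = 'n') ∧ c1 = ':' then
      let pr := pvSplitB rest
      if pvRunCheck double 0 pr.1 then true else pvOuterB double pr.2
    else pvOuterB double (c1 :: rest)
  termination_by l => l.length
  decreasing_by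
  · exact Nat.lt_succ_of_le (Nat.le_succ_of_le (pvSplitB_len rest))
  · simp

def has_unescaped_brackets_in_rn_tokens_py_alt (text : String) (quote_char : Option String) : Bool :=
  pvOuterB (quote_char == some "\"") text.toList

-- ===== PRECONDITION & SPEC =====
def Spec_has_unescaped_brackets_in_rn_tokens_py (text : String) (quote_char : Option String) (out : Bool) : Prop := out = has_unescaped_brackets_in_rn_tokens_py_alt text quote_char
instance (text : String) (quote_char : Option String) (out : Bool) : Decidable (Spec_has_unescaped_brackets_in_rn_tokens_py text quote_char out) := by unfold Spec_has_unescaped_brackets_in_rn_tokens_py; infer_instance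

-- ===== CLAIM (what is proved, stated in full; the proofs are below) =====
def Claim_equal_has_unescaped_brackets_in_rn_tokens_py : Prop := ∀ (text : String) (quote_char : Option String), Dom_has_unescaped_brackets_in_rn_tokens_py text quote_char → Spec_has_unescaped_brackets_in_rn_tokens_py text quote_char (has_unescaped_brackets_in_rn_tokens_py text quote_char)

-- ===== LEMMAS AND PROOFS =====
theorem runCheck_eq (quote_char : Option String) :
    ∀ (rest prev : List Char),
      pvHasUnA quote_char prev rest = pvRunCheck (quote_char == some "\"") (pvCountBack prev) rest := by
  intro rest
  induction rest with
  | nil => intro prev; simp [pvHasUnA, pvRunCheck]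
  | cons c cs ih =>
    intro prev
    by_cases hb : c = '[' ∨ c = ']'
    · have hcb : pvCountBack (c :: prev) = 0 := by
        rcases hb with h | h <;> simp [pvCountBack, h]
      have hns : ¬ c = '\\' := by rcases hb with h | h <;> simp [h]
      have hbad : pvBadA quote_char (pvCountBack prev)
          = (if (quote_char == some "\"") then
              !(decide (pvCountBack prev ≥ 2 ∧ pvCountBack prev % 2 = 0))
             else decide (pvCountBack prev % 2 = 0)) := by
        by_cases hq : quote_char = some "\"" <;> simp [pvBadA, hq]
      simp only [pvHasUnA, pvRunCheck, if_pos hb, if_neg hns, hbad, ih (c :: prev), hcb]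
    · by_cases hs : c = '\\'
      · subst hs
        simp [pvHasUnA, pvRunCheck, ih ('\\' :: prev), pvCountBack]
      · simp [pvHasUnA, pvRunCheck, hb, hs, ih (c :: prev), pvCountBack]

theorem split_eq : ∀ l : List Char, pvRuB l = pvSplitB l := by
  intro l
  induction l with
  | nil => decide
  | cons c cs ih =>
    by_cases h1 : List.isPrefixOf [' ', '&', '&', ' '] (c :: cs) = true
    · have hB : pvBoundaryAt (c :: cs) = true := by unfold pvBoundaryAt; rw [h1]; rfl
      have hr : pvRuB (c :: cs) = ([], c :: cs) := by rw [pvRuB, hB]; rfl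
      have h1' : pvFindSub [' ', '&', '&', ' '] (c :: cs) = some 0 := by
        rw [pvFindSub, if_pos h1]
      rw [hr]
      simp only [pvSplitB, h1']
      cases pvFindSub [' ', 'c', 'o', 'm', 'p', 'a', 'r', 'e', ' '] (c :: cs) <;> simp
    · by_cases h2 : List.isPrefixOf [' ', 'c', 'o', 'm', 'p', 'a', 'r', 'e', ' '] (c :: cs) = true
      · have h1f : List.isPrefixOf [' ', '&', '&', ' '] (c :: cs) = false :=
          Bool.eq_false_iff.mpr h1
        have hB : pvBoundaryAt (c :: cs) = true := by unfold pvBoundaryAt; rw [h1f, h2]; rfl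
        have hr : pvRuB (c :: cs) = ([], c :: cs) := by rw [pvRuB, hB]; rfl
        have h2' : pvFindSub [' ', 'c', 'o', 'm', 'p', 'a', 'r', 'e', ' '] (c :: cs) = some 0 := by
          rw [pvFindSub, if_pos h2]
        rw [hr]
        simp only [pvSplitB, h2']
        cases pvFindSub [' ', '&', '&', ' '] (c :: cs) <;> simp
      · have h1f : List.isPrefixOf [' ', '&', '&', ' '] (c :: cs) = false :=
          Bool.eq_false_iff.mpr h1
        have h2f : List.isPrefixOf [' ', 'c', 'o', 'm', 'p', 'a', 'r', 'e', ' '] (c :: cs) = false :=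
          Bool.eq_false_iff.mpr h2
        have hB : pvBoundaryAt (c :: cs) = false := by unfold pvBoundaryAt; rw [h1f, h2f]; rfl
        have hr : pvRuB (c :: cs) = (c :: (pvRuB cs).1, (pvRuB cs).2) := by
          rw [pvRuB, hB]; rfl
        have f1 : pvFindSub [' ', '&', '&', ' '] (c :: cs)
            = (pvFindSub [' ', '&', '&', ' '] cs).map (· + 1) := by
          rw [pvFindSub, if_neg (by simp [h1f])]
        have f2 : pvFindSub [' ', 'c', 'o', 'm', 'p', 'a', 'r', 'e', ' '] (c :: cs)
            = (pvFindSub [' ', 'c', 'o', 'm', 'p', 'a', 'r', 'e', ' '] cs).map (· + 1) := by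
          rw [pvFindSub, if_neg (by simp [h2f])]
        rw [hr, ih]
        simp only [pvSplitB, f1, f2]
        cases hA : pvFindSub [' ', '&', '&', ' '] cs <;>
          cases hC : pvFindSub [' ', 'c', 'o', 'm', 'p', 'a', 'r', 'e', ' '] cs <;>
            simp [Nat.succ_min_succ]

theorem outer_eq (quote_char : Option String) (l : List Char) :
    pvOuterA quote_char l = pvOuterB (quote_char == some "\"") l := by
  suffices H : ∀ (N : Nat) (l : List Char), l.length ≤ N →
      pvOuterA quote_char l = pvOuterB (quote_char == some "\"") l from H l.length l le_rfl
  intro N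
  induction N with
  | zero =>
    intro l hl
    have : l = [] := List.eq_nil_of_length_eq_zero (Nat.le_zero.mp hl)
    subst this; simp [pvOuterA, pvOuterB]
  | succ N ih =>
    intro l hl
    match l with
    | [] => simp [pvOuterA, pvOuterB]
    | [c0] => simp [pvOuterA, pvOuterB]
    | [c0, c1] =>
      simp only [pvOuterA, pvOuterB]
      split
      · rw [split_eq, runCheck_eq]
        simp only [pvCountBack]
        split
        · rfl
        · exact ih _ (Nat.le_trans (pvSplitB_len []) (Nat.zero_le N))
      · rfl
    | c0 :: c1 :: c2 :: rest2 =>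
      have hlen : rest2.length + 2 ≤ N := by simp at hl; omega
      by_cases hbang : c0 = '!' ∧ (c1 = 'r' ∨ c1 = 'n') ∧ c2 = ':'
      · obtain ⟨h0, h1, h2⟩ := hbang
        have h0r : ¬ ((c0 = 'r' ∨ c0 = 'n') ∧ c1 = ':') := by
          subst h0; rintro ⟨h | h, -⟩ <;> simp at h
        rw [show pvOuterA quote_char (c0 :: c1 :: c2 :: rest2)
              = (let pr := pvRuB rest2;
                 if pvHasUnA quote_char [] pr.1 then true else pvOuterA quote_char pr.2) from by
            rw [pvOuterA]; rw [if_pos ⟨h0, h1, h2⟩]]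
        rw [show pvOuterB (quote_char == some "\"") (c0 :: c1 :: c2 :: rest2)
              = pvOuterB (quote_char == some "\"") (c1 :: c2 :: rest2) from by
            rw [pvOuterB]; rw [if_neg h0r]]
        rw [show pvOuterB (quote_char == some "\"") (c1 :: c2 :: rest2)
              = (let pr := pvSplitB rest2;
                 if pvRunCheck (quote_char == some "\"") 0 pr.1 then true
                 else pvOuterB (quote_char == some "\"") pr.2) from by
            rw [pvOuterB]; rw [if_pos ⟨h1, h2⟩]]
        simp only [split_eq, runCheck_eq, pvCountBack]
        split
        · rfl
        · exact ih _ (Nat.le_trans (pvSplitB_len rest2) (by omega))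
      · rw [show pvOuterA quote_char (c0 :: c1 :: c2 :: rest2)
              = (if (c0 = 'r' ∨ c0 = 'n') ∧ c1 = ':' then
                  (let pr := pvRuB (c2 :: rest2);
                   if pvHasUnA quote_char [] pr.1 then true else pvOuterA quote_char pr.2)
                 else pvOuterA quote_char (c1 :: c2 :: rest2)) from by
            rw [pvOuterA]; rw [if_neg hbang]]
        rw [pvOuterB]
        split
        · simp only [split_eq, runCheck_eq, pvCountBack]
          split
          · rfl
          · exact ih _ (Nat.le_trans (pvSplitB_len (c2 :: rest2)) (by simp; omega))
        · exact ih (c1 :: c2 :: rest2) (by simp; omega)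

-- ===== VERDICT (by name: the statement is the Claim_ definition above) =====
theorem has_unescaped_brackets_in_rn_tokens_py_spec : Claim_equal_has_unescaped_brackets_in_rn_tokens_py := by
  intro text quote_char _
  unfold Spec_has_unescaped_brackets_in_rn_tokens_py
  unfold has_unescaped_brackets_in_rn_tokens_py has_unescaped_brackets_in_rn_tokens_py_alt
  exact outer_eq quote_char text.toList
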